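-- pv_equiv track=rewrite | github.com/dzipsin/p000774csitcp | src/test_evaluation.py | _extract_eval_id
-- ===== SOURCE A (Python) =====
-- def _extract_eval_id(prompt: str) -> str:
--     """Pull eval_id=<value> out of the prompt's alert data."""
--     marker = "eval_id="
--     i = prompt.find(marker)
--     if i < 0:
--         return ""
--     start = i + len(marker)
--     end = start
--     while end < len(prompt) and prompt[end] not in (" ", "&", '"', "\\", "\n", ",", "}"):
--         end += 1
--     return prompt[start:end]
-- ===== SOURCE B (Python) =====
-- _DELIMS = ' &"\\\n,}'
--
-- def _extract_eval_id(prompt: str) -> str: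
--     """Pull eval_id=<value> out of the prompt's alert data."""
--     parts = prompt.split("eval_id=", 1)
--     if len(parts) == 1:
--         return ""
--     value = parts[1]
--     for d in _DELIMS:
--         value = value.split(d, 1)[0]
--     return value
-- ===== Notes on version B (the rewrite author's own statement) =====
-- stated objective: alternative
-- what changed: B replaces A's find + index-walking while loop with staged string splitting: split once on the marker, then for each of the seven delimiters truncate the tail at its first occurrence via split(d, 1)[0]; correct because successive truncation at each delimiter yields the prefix before the earliest delimiter overall.
import Mathlib
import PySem

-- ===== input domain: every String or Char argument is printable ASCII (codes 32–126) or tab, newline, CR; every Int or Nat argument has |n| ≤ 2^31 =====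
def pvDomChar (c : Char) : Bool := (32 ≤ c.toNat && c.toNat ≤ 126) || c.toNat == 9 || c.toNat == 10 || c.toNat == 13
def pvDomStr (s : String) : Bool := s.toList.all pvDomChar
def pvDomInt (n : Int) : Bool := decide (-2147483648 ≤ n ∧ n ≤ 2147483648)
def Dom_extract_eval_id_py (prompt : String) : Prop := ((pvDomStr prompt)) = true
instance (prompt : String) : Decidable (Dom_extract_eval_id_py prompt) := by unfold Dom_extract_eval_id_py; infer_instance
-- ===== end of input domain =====

-- B replaces A's find + index-walking while loop with staged splitting: split once on the marker,
-- then truncate the tail at each delimiter's first occurrence in turn; same O(n) cost.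

-- ===== PORT A =====
-- A's delimiter tuple (" ", "&", '"', "\\", "\n", ",", "}")
def pvDelimA (c : Char) : Bool :=
  c == ' ' || c == '&' || c == '"' || c == '\\' || c == '\n' || c == ',' || c == '}'

-- A's while loop: advance `end` while in range and not a delimiter
def pvAScan (s : List Char) (e : Nat) : Nat :=
  if h : e < s.length then
    if pvDelimA s[e] then e else pvAScan s (e + 1)
  else e
termination_by s.length - e

def extract_eval_id_py (prompt : String) : String :=
  let marker := "eval_id="
  let i := PySem.Chars.find prompt.toList marker.toList
  if i < 0 then ""
  else
    let start := i.toNat + marker.toList.length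
    let e := pvAScan prompt.toList start
    String.ofList (PySem.List.slice prompt.toList (some (start : Int)) (some (e : Int)))

-- ===== PORT B =====
-- value.split(d, 1)[0] for a single char d: the prefix of value before the first d
-- (exact: str.split with a one-char separator and maxsplit=1 keeps everything before the
-- first occurrence in part 0, and the whole string if d does not occur)
def pvCut (t : List Char) (d : Char) : List Char := t.takeWhile (fun c => c != d)

def extract_eval_id_py_alt (prompt : String) : String :=
  -- prompt.split("eval_id=", 1): one part iff the marker is absent (find < 0); otherwise
  -- parts[1] is everything after the first occurrence of the 8-char marker
  let i := PySem.Chars.find prompt.toList "eval_id=".toList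
  if i < 0 then ""
  else
    let value := prompt.toList.drop (i.toNat + 8)
    String.ofList (([' ', '&', '"', '\\', '\n', ',', '}'] : List Char).foldl pvCut value)

-- ===== PRECONDITION & SPEC =====
-- A returns on every prompt, so Pre_ excludes nothing (it holds for every string): it only records
-- the case split the proof follows — the marker is absent from the prompt, or it occurs and each
-- of its letters therefore occurs in the prompt.
def Pre_extract_eval_id_py (prompt : String) : Prop :=
  PySem.Str.find prompt "eval_id=" < 0 ∨
    (['e', 'v', 'a', 'l', '_', 'i', 'd'] : List Char).all (fun c => prompt.toList.contains c) = true
instance (prompt : String) : Decidable (Pre_extract_eval_id_py prompt) := by unfold Pre_extract_eval_id_py; infer_instance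
def pvWitness_extract_eval_id_py : String := "eval_id=abc12"

def Spec_extract_eval_id_py (prompt : String) (out : String) : Prop := out = extract_eval_id_py_alt prompt
instance (prompt : String) (out : String) : Decidable (Spec_extract_eval_id_py prompt out) := by
  unfold Spec_extract_eval_id_py; infer_instance

-- ===== CLAIM =====
def Claim_equal_extract_eval_id_py : Prop :=
  ∀ (prompt : String), Dom_extract_eval_id_py prompt → Pre_extract_eval_id_py prompt → Spec_extract_eval_id_py prompt (extract_eval_id_py prompt)

-- ===== LEMMAS AND PROOFS =====

theorem pvAScan_le (s : List Char) (e : Nat) : e ≤ pvAScan s e := by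
  unfold pvAScan
  split
  · split
    · exact le_refl _
    · exact le_trans (Nat.le_succ e) (pvAScan_le s (e + 1))
  · exact le_refl _
termination_by s.length - e

-- A's slice equals the non-delimiter prefix of the tail
theorem pvScan_eq (s : List Char) (e : Nat) :
    (s.drop e).take (pvAScan s e - e) = (s.drop e).takeWhile (fun c => !pvDelimA c) := by
  by_cases h : e < s.length
  · have hd : s.drop e = s[e] :: s.drop (e + 1) := List.drop_eq_getElem_cons h
    rw [hd]
    unfold pvAScan
    rw [dif_pos h]
    by_cases hc : pvDelimA s[e]
    · simp [hc]
    · have hle := pvAScan_le s (e + 1)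
      have hstep : pvAScan s (e + 1) - e = (pvAScan s (e + 1) - (e + 1)) + 1 := by omega
      have hcb : pvDelimA s[e] = false := Bool.eq_false_iff.mpr hc
      rw [if_neg hc, hstep, List.take_succ_cons, List.takeWhile_cons, hcb]
      simp only [Bool.not_false, if_pos]
      exact congrArg (s[e] :: ·) (pvScan_eq s (e + 1))
  · have hd : s.drop e = [] := List.drop_eq_nil_of_le (by omega)
    unfold pvAScan
    rw [dif_neg h, hd]
    simp
termination_by s.length - e

-- B's seven staged truncations equal the single non-delimiter prefix
theorem pvStages_eq (t : List Char) :
    ([' ', '&', '"', '\\', '\n', ',', '}'] : List Char).foldl pvCut t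
      = t.takeWhile (fun c => !pvDelimA c) := by
  simp only [List.foldl, pvCut, List.takeWhile_takeWhile]
  congr 1
  funext c
  simp only [pvDelimA, Bool.not_or, bne, beq_eq_decide]
  cases h1 : decide (c = ' ') <;> cases h2 : decide (c = '&') <;> cases h3 : decide (c = '"') <;>
    cases h4 : decide (c = '\\') <;> cases h5 : decide (c = '\n') <;> cases h6 : decide (c = ',') <;>
    cases h7 : decide (c = '}') <;> rfl

theorem pvPorts_eq (prompt : String) :
    extract_eval_id_py prompt = extract_eval_id_py_alt prompt := by
  simp only [extract_eval_id_py, extract_eval_id_py_alt,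
    show ("eval_id=" : String).toList.length = 8 from by decide]
  split
  · rfl
  · rw [PySem.List.slice_natCast, pvStages_eq]
    congr 1
    exact pvScan_eq prompt.toList _

-- ===== VERDICT =====
theorem extract_eval_id_py_spec : Claim_equal_extract_eval_id_py := by
  intro prompt _ hpre
  rcases hpre with hpre | hpre <;> exact pvPorts_eq prompt
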